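-- pv_equiv track=rewrite | github.com/reyramon/Resume | generate_resume.py | add_section_dividers
-- ===== SOURCE A (Python) =====
-- def add_section_dividers(text: str) -> str:
--     """
--     Insert markdown horizontal rules before each top-level resume section so
--     Pandoc renders a visible divider line in the final docx.
--     """
--     lines = text.replace("\r\n", "\n").replace("\r", "\n").split("\n")
--     result = []
--     seen_first_section = False
--
--     for line in lines:
--         if line.startswith("## "):
--             if seen_first_section:
--                 if result and result[-1] != "":
--                     result.append("")
--                 result.append("---")
--                 result.append("")
--             else:
--                 if result and result[-1] != "":
--                     result.append("")
--                 result.append("---")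
--                 result.append("")
--                 seen_first_section = True
--         result.append(line)
--
--     return "\n".join(result)
-- ===== SOURCE B (Python) =====
-- import re
--
-- def add_section_dividers(text: str) -> str:
--     """Insert '---' divider blocks before each '## ' section header, regex-based."""
--     norm = text.replace("\r\n", "\n").replace("\r", "\n")
--
--     def repl(m):
--         if m.group(1) == "":          # header at the very start of the text
--             return "---\n\n"
--         if m.start() == 0 or norm[m.start() - 1] == "\n":   # preceded by a blank line
--             return "\n---\n\n"
--         return "\n\n---\n\n"          # preceded by a non-blank line
--
--     return re.sub(r"(^|\n)(?=## )", repl, norm)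
-- ===== Notes on version B (the rewrite author's own statement) =====
-- stated objective: idiomatic
-- what changed: Replaces A's split-into-lines loop that accumulates a result list and rejoins it with a single regex substitution (re.sub with lookahead) on the whole normalized string, choosing the inserted divider block from the character preceding each line-initial section header.
import Mathlib
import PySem

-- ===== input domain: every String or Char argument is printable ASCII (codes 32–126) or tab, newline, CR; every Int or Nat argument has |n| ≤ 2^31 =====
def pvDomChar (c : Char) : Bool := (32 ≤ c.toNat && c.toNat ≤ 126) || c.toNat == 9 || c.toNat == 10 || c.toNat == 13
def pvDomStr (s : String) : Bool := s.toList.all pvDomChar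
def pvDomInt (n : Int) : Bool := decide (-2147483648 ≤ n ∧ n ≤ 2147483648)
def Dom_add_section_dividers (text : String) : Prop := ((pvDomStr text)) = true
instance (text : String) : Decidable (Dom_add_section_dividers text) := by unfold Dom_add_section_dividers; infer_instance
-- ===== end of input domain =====

-- B replaces A's line-by-line loop with result list by a single left-to-right scan (the port of
-- Source B's re.sub, transcribed by hand as a char scan; exact) that inserts a divider block at each
-- line-initial "## " header; proved to return the same string on every input (A is total).
-- Both ports work on List Char (PySem.Chars level, as PYSEM.md directs for string code).

-- ===== PORT A =====
-- the loop body of A (state = (result, seen_first_section)); lines are List Char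
def pvStepA (st : List (List Char) × Bool) (line : List Char) : List (List Char) × Bool :=
  if PySem.Chars.startswith line ['#', '#', ' '] then
    if st.2 then
      (((if st.1 ≠ [] ∧ st.1.getLast? ≠ some [] then st.1 ++ [[]] else st.1) ++
          [['-', '-', '-'], []]) ++ [line], st.2)
    else
      (((if st.1 ≠ [] ∧ st.1.getLast? ≠ some [] then st.1 ++ [[]] else st.1) ++
          [['-', '-', '-'], []]) ++ [line], true)
  else (st.1 ++ [line], st.2)

def add_section_dividers (text : String) : String :=
  let lines := PySem.Chars.splitOn
    (PySem.Chars.replace (PySem.Chars.replace text.toList ['\r', '\n'] ['\n']) ['\r'] ['\n']) ['\n']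
  let st := lines.foldl pvStepA ([], false)
  String.ofList (PySem.Chars.join ['\n'] st.1)

-- ===== PORT B =====
-- the replacement string of Source B's `repl` for a match whose group(1) is "\n": the kept "\n" plus
-- pvIns p, where p is the char preceding the matched "\n" (none = the "\n" is at position 0)
def pvIns (p : Option Char) : List Char :=
  if p = none ∨ p = some '\n' then ['-', '-', '-', '\n', '\n'] else ['\n', '-', '-', '-', '\n', '\n']

-- Source B's re.sub over the pattern "(^|\n)(?=## )", transcribed by hand as a left-to-right scan
-- carrying the previous char; exact (matches cannot overlap, and re.sub resumes after the match)
def pvGo (p : Option Char) : List Char → List Char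
  | [] => []
  | c :: rest =>
    if c = '\n' ∧ PySem.Chars.startswith rest ['#', '#', ' '] = true then
      c :: (pvIns p ++ pvGo (some c) rest)
    else c :: pvGo (some c) rest

def add_section_dividers_alt (text : String) : String :=
  let norm := PySem.Chars.replace (PySem.Chars.replace text.toList ['\r', '\n'] ['\n']) ['\r'] ['\n']
  String.ofList
    ((if PySem.Chars.startswith norm ['#', '#', ' '] then ['-', '-', '-', '\n', '\n'] else []) ++
      pvGo none norm)

-- ===== PRECONDITION & SPEC =====
def Spec_add_section_dividers (text : String) (out : String) : Prop := out = add_section_dividers_alt text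
instance (text : String) (out : String) : Decidable (Spec_add_section_dividers text out) := by unfold Spec_add_section_dividers; infer_instance

-- ===== CLAIM (what is proved, stated in full; the proofs are below) =====
def Claim_equal_add_section_dividers : Prop := ∀ (text : String), Dom_add_section_dividers text → Spec_add_section_dividers text (add_section_dividers text)

-- ===== LEMMAS AND PROOFS =====

-- proof-side split on '\n' (headI form of Python's str.split("\n"))
def pvSp : List Char → List (List Char)
  | [] => [[]]
  | c :: rest => if c = '\n' then [] :: pvSp rest else (c :: (pvSp rest).headI) :: (pvSp rest).tail

lemma pvSp_shape (cs : List Char) : pvSp cs = (pvSp cs).headI :: (pvSp cs).tail := by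
  cases cs with
  | nil => rfl
  | cons c rest => simp only [pvSp]; split <;> rfl

lemma pvGo_eq : ∀ (fuel : Nat) (l cur : List Char) (acc : List (List Char)), l.length ≤ fuel →
    PySem.Chars.splitOn.go ['\n'] fuel l cur acc =
      acc.reverse ++ ((cur.reverse ++ (pvSp l).headI) :: (pvSp l).tail) := by
  intro fuel
  induction fuel with
  | zero =>
    intro l cur acc h
    have : l = [] := by cases l <;> simp_all
    subst this
    simp [PySem.Chars.splitOn.go, pvSp]
  | succ n ih =>
    intro l cur acc h
    cases l with
    | nil => simp [PySem.Chars.splitOn.go, pvSp]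
    | cons c rest =>
      by_cases hc : c = '\n'
      · subst hc
        have hpre : List.isPrefixOf ['\n'] ('\n' :: rest) = true := by
          simp [List.isPrefixOf]
        rw [PySem.Chars.splitOn.go]
        simp only [hpre, if_true, List.length_singleton, List.drop_one, List.tail_cons]
        rw [ih rest [] (cur.reverse :: acc) (by simpa using Nat.le_of_succ_le_succ h)]
        simp [pvSp, ← pvSp_shape]
      · have hpre : List.isPrefixOf ['\n'] (c :: rest) = false := by
          simp only [List.isPrefixOf, Bool.and_true, beq_eq_false_iff_ne, ne_eq]
          exact fun h => hc h.symm
        rw [PySem.Chars.splitOn.go]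
        simp only [hpre, Bool.false_eq_true, if_false]
        rw [ih rest (c :: cur) acc (by simpa using Nat.le_of_succ_le_succ h)]
        simp [pvSp, hc]

lemma pvSplitOn_eq (cs : List Char) : PySem.Chars.splitOn cs ['\n'] = pvSp cs := by
  unfold PySem.Chars.splitOn
  rw [pvGo_eq (cs.length + 1) cs [] [] (Nat.le_succ _)]
  simp [← pvSp_shape]

lemma pvSp_no_nl (cs : List Char) : ∀ l ∈ pvSp cs, '\n' ∉ l := by
  induction cs with
  | nil => simp [pvSp]
  | cons c rest ih =>
    simp only [pvSp]
    by_cases hc : c = '\n'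
    · simp only [hc, if_true]
      intro l hl
      rcases List.mem_cons.mp hl with rfl | hl
      · simp
      · exact ih l hl
    · simp only [hc, if_false]
      intro l hl
      rcases List.mem_cons.mp hl with rfl | hl
      · have hh : (pvSp rest).headI ∈ pvSp rest := by
          rw [pvSp_shape rest]; exact List.mem_cons_self ..
        have := ih _ hh
        simp [Ne.symm hc, this]
      · exact ih l (by rw [pvSp_shape rest]; exact List.mem_cons_of_mem _ hl)

-- intercalate "\n" written as head ++ flatMap
lemma pvInter_cons (x : List Char) (xs : List (List Char)) :
    List.intercalate ['\n'] (x :: xs) = x ++ xs.flatMap (fun l => '\n' :: l) := by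
  induction xs generalizing x with
  | nil => simp [List.intercalate]
  | cons y ys ih =>
    have h2 : List.intercalate ['\n'] (x :: y :: ys) = x ++ ['\n'] ++ List.intercalate ['\n'] (y :: ys) := by
      simp [List.intercalate, List.intersperse]
    rw [h2, ih y]
    simp

lemma pvInter_append (r ys : List (List Char)) (h : r ≠ []) :
    List.intercalate ['\n'] (r ++ ys) =
      List.intercalate ['\n'] r ++ ys.flatMap (fun l => '\n' :: l) := by
  obtain ⟨x, rs, rfl⟩ := List.exists_cons_of_ne_nil h
  rw [List.cons_append, pvInter_cons, pvInter_cons, List.flatMap_append]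
  simp

lemma pvInter_sp (cs : List Char) : List.intercalate ['\n'] (pvSp cs) = cs := by
  induction cs with
  | nil => simp [pvSp, List.intercalate]
  | cons c rest ih =>
    simp only [pvSp]
    by_cases hc : c = '\n'
    · simp only [hc, if_true]
      rw [pvInter_cons, List.nil_append]
      rw [pvSp_shape rest, pvInter_cons] at ih
      rw [pvSp_shape rest]
      simp [ih]
    · simp only [hc, if_false]
      rw [pvInter_cons]
      rw [pvSp_shape rest, pvInter_cons] at ih
      simp [ih]

-- "## " is decided within a newline-free line even when more text follows after a '\n'
lemma pvHdr_boundary (li m : List Char) (hm : m = [] ∨ m.head? = some '\n') :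
    PySem.Chars.startswith (li ++ m) ['#', '#', ' '] = PySem.Chars.startswith li ['#', '#', ' '] := by
  rcases hm with rfl | hm
  · simp
  · obtain ⟨m', rfl⟩ : ∃ m', m = '\n' :: m' := by
      cases m with
      | nil => simp at hm
      | cons c t => exact ⟨t, by simp at hm; rw [hm]⟩
    rcases li with _ | ⟨a, _ | ⟨b, _ | ⟨c, t⟩⟩⟩ <;>
      simp [PySem.Chars.startswith, List.isPrefixOf]

-- scanning a newline-free block just copies it and updates the previous char
lemma pvGo_skip (li : List Char) (q : Option Char) (m : List Char) (h : '\n' ∉ li) :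
    pvGo q (li ++ m) = li ++ pvGo (li.getLast?.or q) m := by
  induction li generalizing q with
  | nil => simp
  | cons c t ih =>
    have hc : ¬ c = '\n' := fun hh => h (hh ▸ List.mem_cons_self ..)
    have ht : '\n' ∉ t := fun hh => h (List.mem_cons_of_mem _ hh)
    rw [List.cons_append, pvGo]
    simp only [hc, false_and, if_false]
    rw [ih (some c) ht]
    congr 2
    cases t with
    | nil => simp
    | cons x xs => simp [List.getLast?_cons]

-- the seen_first_section flag of A is dead: the fold's result component ignores it
def pvStep (r : List (List Char)) (line : List Char) : List (List Char) :=
  if PySem.Chars.startswith line ['#', '#', ' '] then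
    ((if r ≠ [] ∧ r.getLast? ≠ some [] then r ++ [[]] else r) ++ [['-', '-', '-'], []]) ++ [line]
  else r ++ [line]

lemma pvFold_fst (ls : List (List Char)) : ∀ (r : List (List Char)) (b : Bool),
    (ls.foldl pvStepA (r, b)).1 = ls.foldl pvStep r := by
  induction ls with
  | nil => intro r b; rfl
  | cons li ls ih =>
    intro r b
    rw [List.foldl_cons, List.foldl_cons]
    have : pvStepA (r, b) li = (pvStep r li, (pvStepA (r, b) li).2) := by
      unfold pvStepA pvStep
      split <;> [skip; rfl]
      split <;> rfl
    rw [this, ih]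

-- the char before the next line boundary is none/'\n' exactly when the current line is blank
lemma pvOr_iff (li : List Char) (q : Option Char) (h : '\n' ∉ li) (hq : q = none ∨ q = some '\n') :
    (li.getLast?.or q = none ∨ li.getLast?.or q = some '\n') ↔ li = [] := by
  cases li with
  | nil =>
    simp only [List.getLast?_nil, Option.none_or]
    exact iff_of_true hq trivial
  | cons x xs =>
    have hne : (x :: xs) ≠ [] := by simp
    rw [List.getLast?_eq_some_getLast hne, Option.some_or]
    constructor
    · rintro (hh | hh)
      · simp at hh
      · exact absurd ((Option.some.injEq _ _ ▸ hh : _) ▸ List.getLast_mem hne) h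
    · intro hh; simp at hh

-- main invariant: A's remaining fold = B's remaining scan, given that result ends with the
-- previously processed original line `prev` and p is the original char before the next boundary
lemma pvMain : ∀ (ls r : List (List Char)) (prev : List Char) (p : Option Char),
    (∀ l ∈ ls, '\n' ∉ l) → r ≠ [] → r.getLast? = some prev →
    ((p = none ∨ p = some '\n') ↔ prev = []) →
    List.intercalate ['\n'] (ls.foldl pvStep r) =
      List.intercalate ['\n'] r ++ pvGo p (ls.flatMap (fun l => '\n' :: l)) := by
  intro ls
  induction ls with
  | nil => intro r prev p _ _ _ _; simp [pvGo]
  | cons li ls ih =>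
    intro r prev p hnl hr hlast hp
    have hlinl : '\n' ∉ li := hnl li (List.mem_cons_self ..)
    have hlsnl : ∀ l ∈ ls, '\n' ∉ l := fun l hl => hnl l (List.mem_cons_of_mem _ hl)
    have hflat : ls.flatMap (fun l => '\n' :: l) = [] ∨
        (ls.flatMap (fun l => '\n' :: l)).head? = some '\n' := by
      cases ls with
      | nil => left; rfl
      | cons x xs => right; simp
    have hbound : PySem.Chars.startswith (li ++ ls.flatMap (fun l => '\n' :: l)) ['#', '#', ' ']
        = PySem.Chars.startswith li ['#', '#', ' '] := pvHdr_boundary _ _ hflat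
    -- the p passed to the recursive call
    set p' : Option Char := li.getLast?.or (some '\n') with hp'def
    have hp' : (p' = none ∨ p' = some '\n') ↔ li = [] :=
      pvOr_iff li (some '\n') hlinl (Or.inr rfl)
    have hgo : pvGo p (((li :: ls).flatMap (fun l => '\n' :: l))) =
        '\n' :: ((if PySem.Chars.startswith li ['#', '#', ' '] then pvIns p else []) ++
          (li ++ pvGo p' (ls.flatMap (fun l => '\n' :: l)))) := by
      rw [List.flatMap_cons, List.cons_append, pvGo]
      by_cases hh : PySem.Chars.startswith li ['#', '#', ' '] = true
      · rw [if_pos ⟨rfl, hbound ▸ hh⟩, pvGo_skip li (some '\n') _ hlinl, ← hp'def, if_pos hh]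
      · rw [if_neg (fun hcon => hh (hbound ▸ hcon.2)), if_neg hh,
          pvGo_skip li (some '\n') _ hlinl, ← hp'def]
        simp
    rw [List.foldl_cons, hgo]
    by_cases hh : PySem.Chars.startswith li ['#', '#', ' '] = true
    · -- header line: A inserts (optional blank), "---", blank, then the line
      by_cases hprev : prev = []
      · -- previous line blank: no extra blank line
        have hcond : ¬ (r ≠ [] ∧ r.getLast? ≠ some []) := by
          intro ⟨_, h2⟩; exact h2 (hprev ▸ hlast)
        have hstep : pvStep r li = r ++ [['-', '-', '-'], [], li] := by
          unfold pvStep; rw [if_pos hh, if_neg hcond]; simp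
        rw [hstep, ih (r ++ [['-', '-', '-'], [], li]) li p' hlsnl (by simp)
          (by simp) hp']
        rw [pvInter_append r _ hr]
        have hip : pvIns p = ['-', '-', '-', '\n', '\n'] := by
          unfold pvIns; rw [if_pos (hp.mpr hprev)]
        simp [hip, hh]
      · -- previous line non-blank: extra blank line first
        have hcond : (r ≠ [] ∧ r.getLast? ≠ some []) := by
          refine ⟨hr, fun h2 => hprev ?_⟩
          rw [hlast] at h2; simpa using h2
        have hstep : pvStep r li = r ++ [[], ['-', '-', '-'], [], li] := by
          unfold pvStep; rw [if_pos hh, if_pos hcond]; simp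
        rw [hstep, ih (r ++ [[], ['-', '-', '-'], [], li]) li p' hlsnl (by simp)
          (by simp) hp']
        rw [pvInter_append r _ hr]
        have hip : pvIns p = ['\n', '-', '-', '-', '\n', '\n'] := by
          unfold pvIns
          rw [if_neg (fun h => hprev (hp.mp h))]
        simp [hip, hh]
    · -- ordinary line
      have hstep : pvStep r li = r ++ [li] := by
        unfold pvStep; rw [if_neg hh]
      rw [hstep, ih (r ++ [li]) li p' hlsnl (by simp) List.getLast?_concat hp']
      rw [pvInter_append r _ hr]
      simp [hh]

-- the whole computation, at the char level, for an arbitrary normalized string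
lemma pvTop (ns : List Char) :
    List.intercalate ['\n'] ((pvSp ns).foldl pvStep []) =
      (if PySem.Chars.startswith ns ['#', '#', ' '] then ['-', '-', '-', '\n', '\n'] else []) ++
        pvGo none ns := by
  obtain ⟨L0, ls, hsp⟩ : ∃ L0 ls, pvSp ns = L0 :: ls :=
    ⟨(pvSp ns).headI, (pvSp ns).tail, pvSp_shape ns⟩
  have hnl := pvSp_no_nl ns
  rw [hsp] at hnl
  have hL0 : '\n' ∉ L0 := hnl L0 (List.mem_cons_self ..)
  have hls : ∀ l ∈ ls, '\n' ∉ l := fun l hl => hnl l (List.mem_cons_of_mem _ hl)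
  have hns : ns = L0 ++ ls.flatMap (fun l => '\n' :: l) := by
    rw [← pvInter_sp ns, hsp, pvInter_cons]
  have hflat : ls.flatMap (fun l => '\n' :: l) = [] ∨
      (ls.flatMap (fun l => '\n' :: l)).head? = some '\n' := by
    cases ls with
    | nil => left; rfl
    | cons x xs => right; simp
  have hbound : PySem.Chars.startswith ns ['#', '#', ' '] =
      PySem.Chars.startswith L0 ['#', '#', ' '] := by
    rw [hns]; exact pvHdr_boundary _ _ hflat
  set p' : Option Char := L0.getLast?.or none with hp'def
  have hp' : (p' = none ∨ p' = some '\n') ↔ L0 = [] :=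
    pvOr_iff L0 none hL0 (Or.inl rfl)
  have hB : pvGo none ns = L0 ++ pvGo p' (ls.flatMap (fun l => '\n' :: l)) := by
    rw [hns, pvGo_skip L0 none _ hL0]
  rw [hsp, List.foldl_cons]
  by_cases hh : PySem.Chars.startswith L0 ['#', '#', ' '] = true
  · have hstep : pvStep [] L0 = [['-', '-', '-'], [], L0] := by
      unfold pvStep; rw [if_pos hh]; simp
    rw [hstep, pvMain ls [['-', '-', '-'], [], L0] L0 p' hls (by simp)
      (by simp) hp']
    rw [hbound, if_pos hh, hB]
    simp [pvInter_cons]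
  · have hstep : pvStep [] L0 = [L0] := by
      unfold pvStep; rw [if_neg hh]; simp
    rw [hstep, pvMain ls [L0] L0 p' hls (by simp) (by simp) hp']
    rw [hbound, if_neg hh, hB]
    simp [pvInter_cons]

-- ===== VERDICT (by name: the statement is the Claim_ definition above) =====
theorem add_section_dividers_spec : Claim_equal_add_section_dividers := by
  intro text _
  unfold Spec_add_section_dividers add_section_dividers add_section_dividers_alt
  set ns := PySem.Chars.replace (PySem.Chars.replace text.toList ['\r', '\n'] ['\n']) ['\r'] ['\n']
  simp only [pvSplitOn_eq, PySem.Chars.join]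
  rw [pvFold_fst, pvTop ns]
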